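-- pv_equiv track=rewrite | github.com/FZJ-IEK3-VSA/quinex-utils | src/quinex_utils/parsers/quantity_parser.py | get_superstructure_type
-- ===== SOURCE A (Python) =====
-- def get_superstructure_type(separators: list[tuple[str]]) -> str:
--     """Determine the type of superstructure, that is, whether it is a
--     single quantity, a range, a list, or a multidimensional quantity.
--
--     Args:
--         separators (list): List of separators and their roles.
--
--     Returns:
--         superstructure_type (str): Type of superstructure.
--
--     """
--
--     if len(separators) == 0:
--         superstructure_type = "single_quantity"
--     else:
--         superstructure_type = "unknown"
--         for separator in ["range_separator", "list_separator", "multidim_separator", "ratio_separator"]: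
--             if all(sep == separator for _, sep in separators):
--                 superstructure_type = separator.split("_")[0]
--                 break
--
--     return superstructure_type
-- ===== SOURCE B (Python) =====
-- def get_superstructure_type(separators: list[tuple[str]]) -> str:
--     if not separators:
--         return "single_quantity"
--     roles = {sep for _, sep in separators}
--     if len(roles) != 1:
--         return "unknown"
--     known = {"range_separator": "range", "list_separator": "list",
--              "multidim_separator": "multidim", "ratio_separator": "ratio"}
--     (role,) = roles
--     return known.get(role, "unknown")
-- ===== Notes on version B (the rewrite author's own statement) =====
-- stated objective: simpler
-- what changed: Replaces the 4-candidate loop that rescans the whole list per candidate with a single pass building the set of distinct roles, a uniformity check (len==1), and one constant-time lookup in a role->prefix table.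
import Mathlib
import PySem

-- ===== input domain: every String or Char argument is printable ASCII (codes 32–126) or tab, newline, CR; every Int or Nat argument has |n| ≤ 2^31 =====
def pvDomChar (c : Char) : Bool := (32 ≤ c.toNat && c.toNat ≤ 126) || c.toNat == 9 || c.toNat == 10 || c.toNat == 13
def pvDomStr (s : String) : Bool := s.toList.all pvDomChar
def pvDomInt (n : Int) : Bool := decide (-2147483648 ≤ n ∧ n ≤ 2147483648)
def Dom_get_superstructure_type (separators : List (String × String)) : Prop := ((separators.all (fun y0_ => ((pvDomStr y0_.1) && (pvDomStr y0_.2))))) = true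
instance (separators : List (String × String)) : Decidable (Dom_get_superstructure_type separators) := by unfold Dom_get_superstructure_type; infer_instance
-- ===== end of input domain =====

-- B is a single pass building the set of distinct roles plus one table lookup, replacing A's
-- four-candidate loop that rescans the whole list for each candidate (objective: simpler).

-- ===== PORT A =====
-- the candidate list A's for-loop iterates over
def pvCandidates : List String :=
  ["range_separator", "list_separator", "multidim_separator", "ratio_separator"]

-- A's for-loop with break: first candidate c with all(sep == c) wins; else "unknown".
-- separator.split("_")[0]: split? with sep "_" ≠ "" is some, and the result is nonempty, so [0] = headD "".
def pvALoop : List String → List (String × String) → String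
  | [], _ => "unknown"
  | c :: cs, seps =>
    if seps.all (fun p => p.2 == c) then ((PySem.Str.split? c "_").getD []).headD ""
    else pvALoop cs seps

def get_superstructure_type (separators : List (String × String)) : String :=
  if separators.length == 0 then "single_quantity"
  else pvALoop pvCandidates separators

-- ===== PORT B =====
-- B's known role -> prefix table
def pvKnown : PySem.Dict String String :=
  PySem.Dict.mk [("range_separator", "range"), ("list_separator", "list"),
   ("multidim_separator", "multidim"), ("ratio_separator", "ratio")]

def get_superstructure_type_alt (separators : List (String × String)) : String :=
  if separators.isEmpty then "single_quantity"
  else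
    let roles : PySem.Set String := PySem.Set.ofList (separators.map Prod.snd)
    if PySem.Set.len roles != 1 then "unknown"
    else
      match roles with
      | [role] => PySem.Dict.getD pvKnown role "unknown"
      | _ => "unknown"

-- ===== PRECONDITION & SPEC =====
def Spec_get_superstructure_type (separators : List (String × String)) (out : String) : Prop := out = get_superstructure_type_alt separators
instance (separators : List (String × String)) (out : String) : Decidable (Spec_get_superstructure_type separators out) := by unfold Spec_get_superstructure_type; infer_instance

-- ===== CLAIM (what is proved, stated in full; the proofs are below) =====
def Claim_equal_get_superstructure_type : Prop := ∀ (separators : List (String × String)), Dom_get_superstructure_type separators → Spec_get_superstructure_type separators (get_superstructure_type separators)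

-- ===== LEMMAS AND PROOFS =====

-- if every element of l equals c, folding Set.add over l keeps [c]
theorem pv_foldl_add_const (l : List String) (c : String)
    (h : ∀ x ∈ l, x = c) : l.foldl PySem.Set.add [c] = [c] := by
  induction l with
  | nil => rfl
  | cons a t ih =>
    have ha : a = c := h a (by simp)
    subst ha
    simp only [List.foldl_cons]
    have : PySem.Set.add [a] a = [a] := by simp [PySem.Set.add, PySem.Set.contains]
    rw [this]
    exact ih (fun x hx => h x (by simp [hx]))

-- the set of an all-c nonempty list is exactly [c]
theorem pv_ofList_const (l : List String) (c : String) (hne : l ≠ [])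
    (h : ∀ x ∈ l, x = c) : PySem.Set.ofList l = [c] := by
  cases l with
  | nil => exact absurd rfl hne
  | cons a t =>
    have ha : a = c := h a (by simp)
    subst ha
    rw [PySem.Set.ofList_eq_foldl]
    simp only [List.foldl_cons]
    rw [show PySem.Set.add ([] : PySem.Set String) a = [a] from rfl]
    exact pv_foldl_add_const t a (fun x hx => h x (by simp [hx]))

-- all(sep == c) on a nonempty all-r list decides r = c
theorem pv_all_snd (seps : List (String × String)) (r : String)
    (hne : seps ≠ []) (h : ∀ p ∈ seps, p.2 = r) (c : String) :
    (seps.all (fun p => p.2 == c)) = (r == c) := by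
  cases seps with
  | nil => exact absurd rfl hne
  | cons a t =>
    by_cases hrc : r = c
    · have hall2 : ∀ p ∈ (a :: t), (p.2 == c) = true :=
        fun p hp => beq_iff_eq.2 ((h p hp).trans hrc)
      simp [List.all_eq_true.2 hall2, hrc]
    · have ha : a.2 = r := h a (by simp)
      simp only [List.all_cons, ha]
      simp [hrc]

theorem get_superstructure_type_eq (separators : List (String × String)) :
    get_superstructure_type separators = get_superstructure_type_alt separators := by
  cases separators with
  | nil => rfl
  | cons p rest =>
    set seps := p :: rest with hseps
    have hne : seps ≠ [] := by simp [hseps]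
    unfold get_superstructure_type get_superstructure_type_alt
    simp only [hseps, List.length_cons, List.isEmpty_cons]
    by_cases hall : ∀ q ∈ seps, q.2 = p.2
    · -- uniform roles: the set is the singleton [p.2]
      have hset : PySem.Set.ofList (seps.map Prod.snd) = [p.2] := by
        apply pv_ofList_const
        · simp [hseps]
        · intro x hx
          rcases List.mem_map.1 hx with ⟨q, hq, hxq⟩
          rw [← hxq]; exact hall q hq
      have hA : ∀ c, (seps.all (fun q => q.2 == c)) = (p.2 == c) :=
        pv_all_snd seps p.2 hne hall
      simp only [← hseps, hset, pvALoop, pvCandidates, hA]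
      by_cases h1 : p.2 = "range_separator"
      · simp [h1, PySem.Set.len, PySem.Dict.getD, PySem.Dict.get?, pvKnown] <;> decide
      · by_cases h2 : p.2 = "list_separator"
        · simp [h2, PySem.Set.len, PySem.Dict.getD, PySem.Dict.get?, pvKnown] <;> decide
        · by_cases h3 : p.2 = "multidim_separator"
          · simp [h3, PySem.Set.len, PySem.Dict.getD, PySem.Dict.get?, pvKnown] <;> decide
          · by_cases h4 : p.2 = "ratio_separator"
            · simp [h4, PySem.Set.len, PySem.Dict.getD, PySem.Dict.get?, pvKnown] <;> decide
            · have e1 := beq_eq_false_iff_ne.2 (fun h => h1 h.symm)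
              have e2 := beq_eq_false_iff_ne.2 (fun h => h2 h.symm)
              have e3 := beq_eq_false_iff_ne.2 (fun h => h3 h.symm)
              have e4 := beq_eq_false_iff_ne.2 (fun h => h4 h.symm)
              have hb1 : ((p.2 == "range_separator") : Bool) = false := beq_eq_false_iff_ne.2 h1
              have hb2 : ((p.2 == "list_separator") : Bool) = false := beq_eq_false_iff_ne.2 h2
              have hb3 : ((p.2 == "multidim_separator") : Bool) = false := beq_eq_false_iff_ne.2 h3
              have hb4 : ((p.2 == "ratio_separator") : Bool) = false := beq_eq_false_iff_ne.2 h4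
              simp [hb1, hb2, hb3, hb4, e1, e2, e3, e4, PySem.Set.len,
                    PySem.Dict.getD, PySem.Dict.get?, pvKnown, List.find?]
    · -- non-uniform roles: A's every candidate test fails, B's set has ≥ 2 elements
      have hA : ∀ c, (seps.all (fun q => q.2 == c)) = false := by
        intro c
        by_contra hcon
        have htrue : (seps.all (fun q => q.2 == c)) = true := by
          cases hx : seps.all (fun q => q.2 == c)
          · exact absurd hx hcon
          · rfl
        have hc : ∀ q ∈ seps, q.2 = c := by
          intro q hq
          have := (List.all_eq_true.1 htrue) q hq
          exact beq_iff_eq.1 this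
        exact hall (fun q hq => by rw [hc q hq, hc p (by simp [hseps])])
      have hlen : (PySem.Set.ofList (seps.map Prod.snd)).length ≠ 1 := by
        intro h1
        rcases List.length_eq_one_iff.1 h1 with ⟨x, hx⟩
        have hmem : ∀ y ∈ seps.map Prod.snd, y = x := by
          intro y hy
          have : y ∈ PySem.Set.ofList (seps.map Prod.snd) := (PySem.Set.mem_ofList _ _).2 hy
          rw [hx] at this; simpa using this
        apply hall
        intro q hq
        have hq2 : q.2 = x := hmem q.2 (List.mem_map.2 ⟨q, hq, rfl⟩)
        have hp2 : p.2 = x := hmem p.2 (List.mem_map.2 ⟨p, by simp [hseps], rfl⟩)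
        rw [hq2, hp2]
      simp only [← hseps, pvALoop, pvCandidates, hA]
      simp [PySem.Set.len]
      exact fun h => absurd h hlen

-- ===== VERDICT (by name: the statement is the Claim_ definition above) =====
theorem get_superstructure_type_spec : Claim_equal_get_superstructure_type := by
  intro separators _
  unfold Spec_get_superstructure_type
  exact get_superstructure_type_eq separators
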